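-- pv_equiv track=rewrite | github.com/ETOgaosion/verl | verl/utils/seqlen_balancing.py | multiway_greedy_partition
-- ===== SOURCE A (Python) =====
-- import heapq
--
-- def multiway_greedy_partition(seqlen_list: list[int], k_partitions: int, equal_size: bool) -> list[list[int]]:
--     """Partition items into k groups using multiway greedy (LPT) assignment.
--
--     Sort items by value descending, then assign each item to the partition with
--     the smallest current sum. When equal_size=True, enforces a fixed number of
--     items per partition.
--
--     Args:
--         seqlen_list: Values to partition (typically sequence lengths or workloads).
--         k_partitions: Number of partitions to create.
--         equal_size: If True, enforces len(seqlen_list) / k_partitions items per partition.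
--
--     Returns:
--         list[list[int]]: List of k partitions, each containing indices into seqlen_list.
--     """
--     assert k_partitions > 0, "k_partitions must be > 0"
--     assert len(seqlen_list) >= k_partitions, f"{len(seqlen_list)} < {k_partitions}"
--
--     if equal_size:
--         assert len(seqlen_list) % k_partitions == 0, f"{len(seqlen_list)} % {k_partitions} != 0"
--         target_size = len(seqlen_list) // k_partitions
--     else:
--         target_size = None
--
--     sorted_indices = sorted(range(len(seqlen_list)), key=lambda i: seqlen_list[i], reverse=True)
--     # heap item: (current_sum, current_count, partition_id, indices)
--     heap = [(0, 0, p, []) for p in range(k_partitions)]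
--     heapq.heapify(heap)
--
--     for idx in sorted_indices:
--         temp = None
--         if target_size is None:
--             cur_sum, cur_count, p, items = heapq.heappop(heap)
--         else:
--             temp = []
--             cur_sum = cur_count = p = None
--             items = None
--             while heap:
--                 cur_sum, cur_count, p, items = heapq.heappop(heap)
--                 if cur_count < target_size:
--                     break
--                 temp.append((cur_sum, cur_count, p, items))
--             if items is None or cur_count is None or cur_count >= target_size:
--                 raise RuntimeError("Failed to assign partition in multiway_greedy_partition")
--
--         items.append(idx)
--         cur_sum += seqlen_list[idx]
--         cur_count += 1
--         heapq.heappush(heap, (cur_sum, cur_count, p, items))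
--
--         if temp:
--             for entry in temp:
--                 heapq.heappush(heap, entry)
--
--     heap.sort(key=lambda x: x[2])
--     partitions = [items for _, _, _, items in heap]
--
--     if target_size is not None:
--         for i, partition in enumerate(partitions):
--             assert len(partition) == target_size, f"partition {i} size {len(partition)} != {target_size}"
--
--     return partitions
-- ===== SOURCE B (Python) =====
-- def multiway_greedy_partition(seqlen_list: list[int], k_partitions: int, equal_size: bool) -> list[list[int]]:
--     """Greedy LPT partition using a flat array of k partition records and a linear
--     min-scan by (sum, count, partition_id) instead of a binary heap."""
--     assert k_partitions > 0, "k_partitions must be > 0"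
--     assert len(seqlen_list) >= k_partitions, f"{len(seqlen_list)} < {k_partitions}"
--
--     if equal_size:
--         assert len(seqlen_list) % k_partitions == 0, f"{len(seqlen_list)} % {k_partitions} != 0"
--         target_size = len(seqlen_list) // k_partitions
--     else:
--         target_size = None
--
--     sorted_indices = sorted(range(len(seqlen_list)), key=lambda i: seqlen_list[i], reverse=True)
--     # one record per partition id: [current_sum, current_count, indices]
--     records = [[0, 0, []] for _ in range(k_partitions)]
--
--     for idx in sorted_indices:
--         best = None
--         for p in range(k_partitions):
--             rec = records[p]
--             if target_size is not None and rec[1] >= target_size: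
--                 continue
--             if best is None or (rec[0], rec[1]) < (records[best][0], records[best][1]):
--                 best = p
--         if best is None:
--             raise RuntimeError("Failed to assign partition in multiway_greedy_partition")
--         rec = records[best]
--         rec[0] += seqlen_list[idx]
--         rec[1] += 1
--         rec[2].append(idx)
--
--     partitions = [rec[2] for rec in records]
--     if target_size is not None:
--         for i, partition in enumerate(partitions):
--             assert len(partition) == target_size, f"partition {i} size {len(partition)} != {target_size}"
--     return partitions
-- ===== Notes on version B (the rewrite author's own statement) =====
-- stated objective: simpler
-- what changed: Replaces the binary heap (heapify/heappop/heappush with a pop-and-stash loop for equal_size) by a flat list of k partition records in partition-id order and a single linear min-scan by (sum, count, partition_id) that skips full partitions, updating the chosen record in place.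
import Mathlib
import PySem

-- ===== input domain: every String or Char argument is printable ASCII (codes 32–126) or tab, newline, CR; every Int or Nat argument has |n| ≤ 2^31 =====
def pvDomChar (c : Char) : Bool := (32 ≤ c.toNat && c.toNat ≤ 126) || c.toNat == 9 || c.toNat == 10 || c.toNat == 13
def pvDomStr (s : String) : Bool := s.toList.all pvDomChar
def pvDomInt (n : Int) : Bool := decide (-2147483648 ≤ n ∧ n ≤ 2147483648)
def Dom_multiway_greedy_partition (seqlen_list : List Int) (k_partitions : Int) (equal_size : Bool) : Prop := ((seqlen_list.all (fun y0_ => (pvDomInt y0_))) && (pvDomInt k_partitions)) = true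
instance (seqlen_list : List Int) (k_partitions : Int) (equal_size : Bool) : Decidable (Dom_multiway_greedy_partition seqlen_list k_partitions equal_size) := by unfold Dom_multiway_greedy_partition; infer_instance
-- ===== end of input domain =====

-- B replaces A's binary heap by a flat list of k partition records scanned linearly
-- for the minimum by (sum, count, partition_id); objective: simpler (return value proved equal on Pre_).

-- ===== PORT A =====
-- heap items (current_sum, current_count, partition_id, indices)
abbrev MgpTup : Type := Int × Int × Int × List Int

-- tuple comparison as heapq performs it: lexicographic on (sum, count, p)
-- (the 4th component is never compared since partition ids are distinct)
def mgpLt (a b : MgpTup) : Bool :=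
  decide (a.1 < b.1) || (a.1 == b.1 && (decide (a.2.1 < b.2.1) || (a.2.1 == b.2.1 && decide (a.2.2.1 < b.2.2.1))))

-- heapq.heappop modelled on the plain list: remove the minimal element (none = empty heap)
def mgpPopMin (heap : List MgpTup) : Option (MgpTup × List MgpTup) :=
  match heap with
  | [] => none
  | h :: t =>
    let m := t.foldl (fun acc x => if mgpLt x acc then x else acc) h
    some (m, heap.erase m)

-- A's 'while heap:' pop-and-stash loop (fuel = heap length makes the drain total)
def mgpPopLoop (target : Int) : Nat → List MgpTup → List MgpTup → List MgpTup × Option (MgpTup × List MgpTup)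
  | 0, _, temp => (temp, none)
  | fuel + 1, heap, temp =>
    match mgpPopMin heap with
    | none => (temp, none)
    | some (m, rest) =>
      if m.2.1 < target then (temp, some (m, rest))
      else mgpPopLoop target fuel rest (temp ++ [m])

-- one iteration of A's 'for idx in sorted_indices' loop; none = RuntimeError raised
def mgpStepA (seqlen : List Int) (target : Option Int) (st : Option (List MgpTup)) (idx : Int) : Option (List MgpTup) :=
  match st with
  | none => none
  | some heap =>
    let v := PySem.List.pyGetD seqlen idx 0
    match target with
    | none =>
      match mgpPopMin heap with
      | none => none
      | some (m, rest) => some (rest ++ [(m.1 + v, m.2.1 + 1, m.2.2.1, m.2.2.2 ++ [idx])])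
    | some t =>
      match mgpPopLoop t heap.length heap [] with
      | (_, none) => none
      | (temp, some (m, rest)) => some (rest ++ [(m.1 + v, m.2.1 + 1, m.2.2.1, m.2.2.2 ++ [idx])] ++ temp)

def multiway_greedy_partition (seqlen_list : List Int) (k_partitions : Int) (equal_size : Bool) : List (List Int) :=
  let n : Int := (seqlen_list.length : Int)
  if 0 < k_partitions then
    if k_partitions ≤ n then
      if equal_size = true ∧ ¬ PySem.Int.mod n k_partitions = 0 then []
      else
        let target : Option Int := if equal_size then some (PySem.Int.floordiv n k_partitions) else none
        let sorted_indices := PySem.List.sorted (PySem.List.pyRange 0 n 1) (fun i => PySem.List.pyGetD seqlen_list i 0) true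
        let heap0 : List MgpTup := (PySem.List.pyRange 0 k_partitions 1).map (fun p => (0, 0, p, []))
        match sorted_indices.foldl (mgpStepA seqlen_list target) (some heap0) with
        | none => []
        | some heap =>
          let hs := PySem.List.sorted heap (fun x => x.2.2.1) false
          let partitions := hs.map (fun x => x.2.2.2)
          match target with
          | none => partitions
          | some t => if partitions.all (fun pa => ((pa.length : Int) == t)) then partitions else []
    else []
  else []

-- ===== PORT B =====
-- one record per partition id: (current_sum, current_count, indices)
abbrev MgpRec : Type := Int × Int × List Int

-- B's 'continue' test: partition already full
def mgpFull (target : Option Int) (r : MgpRec) : Bool :=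
  match target with
  | some t => decide (t ≤ r.2.1)
  | none => false

-- B's inner scan: first index minimising (sum, count) among non-full partitions
def mgpScan (target : Option Int) (k : Int) (records : List MgpRec) : Option Int :=
  (PySem.List.pyRange 0 k 1).foldl
    (fun best p =>
      let r := PySem.List.pyGetD records p (0, 0, [])
      if mgpFull target r then best
      else
        match best with
        | none => some p
        | some b =>
          let rb := PySem.List.pyGetD records b (0, 0, [])
          if r.1 < rb.1 ∨ (r.1 = rb.1 ∧ r.2.1 < rb.2.1) then some p else best)
    none

-- one iteration of B's loop; none = RuntimeError raised
def mgpStepB (seqlen : List Int) (target : Option Int) (k : Int) (st : Option (List MgpRec)) (idx : Int) : Option (List MgpRec) :=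
  match st with
  | none => none
  | some records =>
    match mgpScan target k records with
    | none => none
    | some p =>
      let r := PySem.List.pyGetD records p (0, 0, [])
      let v := PySem.List.pyGetD seqlen idx 0
      some (records.set p.toNat (r.1 + v, r.2.1 + 1, r.2.2 ++ [idx]))

def multiway_greedy_partition_alt (seqlen_list : List Int) (k_partitions : Int) (equal_size : Bool) : List (List Int) :=
  let n : Int := (seqlen_list.length : Int)
  if 0 < k_partitions then
    if k_partitions ≤ n then
      if equal_size = true ∧ ¬ PySem.Int.mod n k_partitions = 0 then []
      else
        let target : Option Int := if equal_size then some (PySem.Int.floordiv n k_partitions) else none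
        let sorted_indices := PySem.List.sorted (PySem.List.pyRange 0 n 1) (fun i => PySem.List.pyGetD seqlen_list i 0) true
        let records0 : List MgpRec := (PySem.List.pyRange 0 k_partitions 1).map (fun _ => (0, 0, []))
        match sorted_indices.foldl (mgpStepB seqlen_list target k_partitions) (some records0) with
        | none => []
        | some records =>
          let partitions := records.map (fun r => r.2.2)
          match target with
          | none => partitions
          | some t => if partitions.all (fun pa => ((pa.length : Int) == t)) then partitions else []
    else []
  else []

-- ===== PRECONDITION & SPEC =====
-- Pre_ excludes exactly the inputs where A's asserts raise AssertionError:
-- k_partitions ≤ 0, fewer items than partitions, or equal_size with len not divisible by k.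
def Pre_multiway_greedy_partition (seqlen_list : List Int) (k_partitions : Int) (equal_size : Bool) : Prop :=
  0 < k_partitions ∧ k_partitions ≤ (seqlen_list.length : Int) ∧
    (equal_size = true → PySem.Int.mod (seqlen_list.length : Int) k_partitions = 0)
instance (seqlen_list : List Int) (k_partitions : Int) (equal_size : Bool) : Decidable (Pre_multiway_greedy_partition seqlen_list k_partitions equal_size) := by unfold Pre_multiway_greedy_partition; infer_instance

def pvWitness_multiway_greedy_partition : List Int × Int × Bool := ([3, 1, 2, 5], 2, true)

def Spec_multiway_greedy_partition (seqlen_list : List Int) (k_partitions : Int) (equal_size : Bool) (out : List (List Int)) : Prop := out = multiway_greedy_partition_alt seqlen_list k_partitions equal_size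
instance (seqlen_list : List Int) (k_partitions : Int) (equal_size : Bool) (out : List (List Int)) : Decidable (Spec_multiway_greedy_partition seqlen_list k_partitions equal_size out) := by unfold Spec_multiway_greedy_partition; infer_instance

-- ===== CLAIM (what is proved, stated in full; the proofs are below) =====
def Claim_equal_multiway_greedy_partition : Prop := ∀ (seqlen_list : List Int) (k_partitions : Int) (equal_size : Bool), Dom_multiway_greedy_partition seqlen_list k_partitions equal_size → Pre_multiway_greedy_partition seqlen_list k_partitions equal_size → Spec_multiway_greedy_partition seqlen_list k_partitions equal_size (multiway_greedy_partition seqlen_list k_partitions equal_size)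

-- ===== LEMMAS AND PROOFS =====

-- the comparison key heapq effectively uses, and its strict lexicographic order
def mgpKey (x : MgpTup) : Int × Int × Int := (x.1, x.2.1, x.2.2.1)

def mgpKeyLt (a b : Int × Int × Int) : Prop :=
  a.1 < b.1 ∨ (a.1 = b.1 ∧ (a.2.1 < b.2.1 ∨ (a.2.1 = b.2.1 ∧ a.2.2 < b.2.2)))

theorem mgpLt_iff (a b : MgpTup) : mgpLt a b = true ↔ mgpKeyLt (mgpKey a) (mgpKey b) := by
  simp [mgpLt, mgpKey, mgpKeyLt]

-- the B-side record at index j viewed as A's heap tuple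
def mgpTupAt (records : List MgpRec) (j : Nat) : MgpTup :=
  ((records.getD j (0, 0, [])).1, (records.getD j (0, 0, [])).2.1, (j : Int), (records.getD j (0, 0, [])).2.2)

def mgpToHeap (records : List MgpRec) : List MgpTup :=
  (List.range records.length).map (mgpTupAt records)

-- "partition non-full" on the tuple side
def mgpOpen (target : Option Int) (x : MgpTup) : Prop :=
  match target with
  | some t => x.2.1 < t
  | none => True

-- relation between A's heap state and B's record-array state
def MgpRel (k : Int) (stA : Option (List MgpTup)) (stB : Option (List MgpRec)) : Prop :=
  (stA = none ∧ stB = none) ∨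
    ∃ heap records, stA = some heap ∧ stB = some records ∧
      records.length = k.toNat ∧ heap.Perm (mgpToHeap records)

theorem mgpKeyLt_trans {a b c : Int × Int × Int} (h1 : mgpKeyLt a b) (h2 : mgpKeyLt b c) :
    mgpKeyLt a c := by
  obtain ⟨a1, a2, a3⟩ := a; obtain ⟨b1, b2, b3⟩ := b; obtain ⟨c1, c2, c3⟩ := c
  simp only [mgpKeyLt] at *; omega

theorem mgpKeyLt_irrefl (a : Int × Int × Int) : ¬ mgpKeyLt a a := by
  obtain ⟨a1, a2, a3⟩ := a; simp only [mgpKeyLt]; omega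

theorem mgpKeyLt_of_not_of {a b c : Int × Int × Int} (h1 : ¬ mgpKeyLt a b) (h2 : mgpKeyLt a c) :
    mgpKeyLt b c := by
  obtain ⟨a1, a2, a3⟩ := a; obtain ⟨b1, b2, b3⟩ := b; obtain ⟨c1, c2, c3⟩ := c
  simp only [mgpKeyLt] at *; omega

theorem mgpKeyLt_antisymm {a b : Int × Int × Int} (h1 : ¬ mgpKeyLt a b) (h2 : ¬ mgpKeyLt b a) :
    a = b := by
  obtain ⟨a1, a2, a3⟩ := a; obtain ⟨b1, b2, b3⟩ := b
  simp only [mgpKeyLt] at *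
  simp only [Prod.mk.injEq]; omega

theorem mgpFoldlMin_spec (t : List MgpTup) (a : MgpTup) :
    (t.foldl (fun acc x => if mgpLt x acc then x else acc) a = a ∨
      t.foldl (fun acc x => if mgpLt x acc then x else acc) a ∈ t) ∧
    ¬ mgpKeyLt (mgpKey a) (mgpKey (t.foldl (fun acc x => if mgpLt x acc then x else acc) a)) ∧
    ∀ x ∈ t, ¬ mgpKeyLt (mgpKey x) (mgpKey (t.foldl (fun acc x => if mgpLt x acc then x else acc) a)) := by
  induction t generalizing a with
  | nil => exact ⟨Or.inl rfl, mgpKeyLt_irrefl _, by simp⟩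
  | cons x t ih =>
    simp only [List.foldl_cons]
    by_cases h : mgpLt x a = true
    · rw [if_pos h]
      obtain ⟨hmem, hacc, hall⟩ := ih x
      have hxa : mgpKeyLt (mgpKey x) (mgpKey a) := (mgpLt_iff x a).mp h
      refine ⟨?_, ?_, ?_⟩
      · rcases hmem with h' | h'
        · exact Or.inr (by rw [h']; exact List.mem_cons_self)
        · exact Or.inr (List.mem_cons_of_mem _ h')
      · intro hcon
        exact hacc (mgpKeyLt_trans hxa hcon)
      · intro y hy
        rcases List.mem_cons.mp hy with h' | h'
        · rw [h']; exact hacc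
        · exact hall y h'
    · rw [if_neg h]
      obtain ⟨hmem, hacc, hall⟩ := ih a
      have hxa : ¬ mgpKeyLt (mgpKey x) (mgpKey a) := fun hc => h ((mgpLt_iff x a).mpr hc)
      refine ⟨?_, hacc, ?_⟩
      · rcases hmem with h' | h'
        · exact Or.inl h'
        · exact Or.inr (List.mem_cons_of_mem _ h')
      · intro y hy
        rcases List.mem_cons.mp hy with h' | h'
        · subst h'; intro hc; exact hacc (mgpKeyLt_of_not_of hxa hc)
        · exact hall y h'

theorem mgpPopMin_spec (heap : List MgpTup) (hne : heap ≠ []) :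
    ∃ m, mgpPopMin heap = some (m, heap.erase m) ∧ m ∈ heap ∧
      ∀ x ∈ heap, ¬ mgpKeyLt (mgpKey x) (mgpKey m) := by
  obtain ⟨h, t, rfl⟩ := List.exists_cons_of_ne_nil hne
  obtain ⟨hmem, hacc, hall⟩ := mgpFoldlMin_spec t h
  refine ⟨t.foldl (fun acc x => if mgpLt x acc then x else acc) h, rfl, ?_, ?_⟩
  · rcases hmem with h' | h'
    · rw [h']; exact List.mem_cons_self
    · exact List.mem_cons_of_mem _ h'
  · intro y hy
    rcases List.mem_cons.mp hy with h' | h'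
    · rw [h']; exact hacc
    · exact hall y h'

theorem mgpPopLoop_none (target : Int) (fuel : Nat) (heap temp : List MgpTup)
    (h : ∀ x ∈ heap, ¬ x.2.1 < target) :
    (mgpPopLoop target fuel heap temp).2 = none := by
  induction fuel generalizing heap temp with
  | zero => simp [mgpPopLoop]
  | succ fuel ih =>
    by_cases hne : heap = []
    · subst hne; simp [mgpPopLoop, mgpPopMin]
    · obtain ⟨m, hpm, hm, -⟩ := mgpPopMin_spec heap hne
      simp only [mgpPopLoop, hpm]
      rw [if_neg (h m hm)]
      exact ih _ _ (fun x hx => h x (List.erase_subset hx))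

theorem mgpPopLoop_some (target : Int) (fuel : Nat) (heap temp : List MgpTup)
    (hfuel : heap.length ≤ fuel) (hex : ∃ x ∈ heap, x.2.1 < target) :
    ∃ m rest d, mgpPopLoop target fuel heap temp = (temp ++ d, some (m, rest)) ∧
      m ∈ heap ∧ m.2.1 < target ∧
      (∀ x ∈ heap, x.2.1 < target → ¬ mgpKeyLt (mgpKey x) (mgpKey m)) ∧
      (d ++ rest).Perm (heap.erase m) := by
  induction fuel generalizing heap temp with
  | zero =>
    obtain ⟨x, hx, -⟩ := hex
    have : heap ≠ [] := fun h => by simp [h] at hx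
    have := List.length_pos_of_ne_nil this
    omega
  | succ fuel ih =>
    have hne : heap ≠ [] := by
      obtain ⟨x, hx, -⟩ := hex
      exact fun h => by simp [h] at hx
    obtain ⟨m0, hpm, hm0, hmin0⟩ := mgpPopMin_spec heap hne
    simp only [mgpPopLoop, hpm]
    by_cases h0 : m0.2.1 < target
    · rw [if_pos h0]
      exact ⟨m0, heap.erase m0, [], by simp, hm0, h0,
        fun x hx _ => hmin0 x hx, by simp [List.Perm.refl]⟩
    · rw [if_neg h0]
      obtain ⟨x, hx, hxt⟩ := hex
      have hxm0 : x ≠ m0 := fun h => h0 (h ▸ hxt)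
      have hxe : x ∈ heap.erase m0 := (List.mem_erase_of_ne hxm0).mpr hx
      have hlen : (heap.erase m0).length ≤ fuel := by
        rw [List.length_erase_of_mem hm0]
        have := List.length_pos_of_ne_nil hne
        omega
      obtain ⟨m, rest, d, heq, hmem, ht, hmin, hperm⟩ :=
        ih (heap.erase m0) (temp ++ [m0]) hlen ⟨x, hxe, hxt⟩
      refine ⟨m, rest, m0 :: d, by rw [heq]; simp, List.erase_subset hmem, ht, ?_, ?_⟩
      · intro y hy hyt
        by_cases hym0 : y = m0
        · exact hym0 ▸ fun hc => h0 (hym0 ▸ hyt)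
        · exact hmin y ((List.mem_erase_of_ne hym0).mpr hy) hyt
      · have hm0e : m0 ∈ heap.erase m := by
          refine (List.mem_erase_of_ne ?_).mpr hm0
          exact fun h => h0 (h ▸ ht)
        have h1 := hperm.cons m0
        rw [List.erase_comm m0 m (l := heap)] at h1
        simpa using h1.trans (List.perm_cons_erase hm0e).symm

-- the body of B's inner scan, named for the fold-invariant proof
def mgpScanF (target : Option Int) (records : List MgpRec) (best : Option Int) (p : Int) : Option Int :=
  let r := PySem.List.pyGetD records p (0, 0, [])
  if mgpFull target r then best
  else
    match best with
    | none => some p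
    | some b =>
      let rb := PySem.List.pyGetD records b (0, 0, [])
      if r.1 < rb.1 ∨ (r.1 = rb.1 ∧ r.2.1 < rb.2.1) then some p else best

theorem mgpFull_iff (target : Option Int) (records : List MgpRec) (j : Nat) :
    mgpFull target (records.getD j (0, 0, [])) = true ↔ ¬ mgpOpen target (mgpTupAt records j) := by
  cases target <;> simp [mgpFull, mgpOpen, mgpTupAt]

theorem mgpScan_aux (target : Option Int) (records : List MgpRec) :
    ∀ i, i ≤ records.length →
      (((List.range i).foldl (fun best (j : Nat) => mgpScanF target records best (j : Int)) none = none ∧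
          ∀ j, j < i → ¬ mgpOpen target (mgpTupAt records j)) ∨
        ∃ b, b < i ∧
          (List.range i).foldl (fun best (j : Nat) => mgpScanF target records best (j : Int)) none = some (b : Int) ∧
          mgpOpen target (mgpTupAt records b) ∧
          ∀ j, j < i → mgpOpen target (mgpTupAt records j) →
            ¬ mgpKeyLt (mgpKey (mgpTupAt records j)) (mgpKey (mgpTupAt records b))) := by
  intro i
  induction i with
  | zero => intro _; exact Or.inl ⟨rfl, by omega⟩
  | succ i ih =>
    intro hi
    have ih' := ih (by omega)
    rw [List.range_succ, List.foldl_append, List.foldl_cons, List.foldl_nil]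
    have hoi_iff := mgpFull_iff target records i
    rcases ih' with ⟨hst, hall⟩ | ⟨b, hb, hst, hopen, hmin⟩
    · rw [hst]
      simp only [mgpScanF, PySem.List.pyGetD_natCast]
      by_cases hf : mgpFull target (records.getD i (0, 0, [])) = true
      · rw [if_pos hf]
        refine Or.inl ⟨rfl, fun j hj => ?_⟩
        rcases Nat.lt_succ_iff_lt_or_eq.mp hj with h' | h'
        · exact hall j h'
        · subst h'; exact ((mgpFull_iff target records j).mp hf)
      · rw [if_neg hf]
        have hoi : mgpOpen target (mgpTupAt records i) := by
          by_contra hc; exact hf (hoi_iff.mpr hc)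
        refine Or.inr ⟨i, by omega, rfl, hoi, fun j hj hoj => ?_⟩
        rcases Nat.lt_succ_iff_lt_or_eq.mp hj with h' | h'
        · exact absurd hoj (hall j h')
        · subst h'; exact mgpKeyLt_irrefl _
    · rw [hst]
      simp only [mgpScanF, PySem.List.pyGetD_natCast]
      by_cases hf : mgpFull target (records.getD i (0, 0, [])) = true
      · rw [if_pos hf]
        refine Or.inr ⟨b, by omega, rfl, hopen, fun j hj hoj => ?_⟩
        rcases Nat.lt_succ_iff_lt_or_eq.mp hj with h' | h'
        · exact hmin j h' hoj
        · subst h'; exact absurd hoj ((mgpFull_iff target records j).mp hf)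
      · rw [if_neg hf]
        have hoi : mgpOpen target (mgpTupAt records i) := by
          by_contra hc; exact hf (hoi_iff.mpr hc)
        by_cases hc : (records.getD i (0, 0, [])).1 < (records.getD b (0, 0, [])).1 ∨
            ((records.getD i (0, 0, [])).1 = (records.getD b (0, 0, [])).1 ∧
              (records.getD i (0, 0, [])).2.1 < (records.getD b (0, 0, [])).2.1)
        · rw [if_pos hc]
          refine Or.inr ⟨i, by omega, rfl, hoi, fun j hj hoj => ?_⟩
          rcases Nat.lt_succ_iff_lt_or_eq.mp hj with h' | h'
          · have hjb := hmin j h' hoj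
            simp only [mgpKeyLt, mgpKey, mgpTupAt] at hjb ⊢
            omega
          · subst h'; exact mgpKeyLt_irrefl _
        · rw [if_neg hc]
          refine Or.inr ⟨b, by omega, rfl, hopen, fun j hj hoj => ?_⟩
          rcases Nat.lt_succ_iff_lt_or_eq.mp hj with h' | h'
          · exact hmin j h' hoj
          · subst h'
            have hbi : (b : Int) < (j : Int) := by exact_mod_cast hb
            simp only [mgpKeyLt, mgpKey, mgpTupAt] at hc ⊢
            omega

theorem mgpScan_spec (target : Option Int) (k : Int) (records : List MgpRec)
    (hk : records.length = k.toNat) :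
    (mgpScan target k records = none ∧ ∀ j (hj : j < records.length), ¬ mgpOpen target (mgpTupAt records j))
    ∨ ∃ p, ∃ hp : p < records.length, mgpScan target k records = some (p : Int) ∧
        mgpOpen target (mgpTupAt records p) ∧
        ∀ j (hj : j < records.length), mgpOpen target (mgpTupAt records j) →
          ¬ mgpKeyLt (mgpKey (mgpTupAt records j)) (mgpKey (mgpTupAt records p)) := by
  have haux := mgpScan_aux target records records.length le_rfl
  have hrw : mgpScan target k records =
      (List.range records.length).foldl (fun best (j : Nat) => mgpScanF target records best (j : Int)) none := by
    show (PySem.List.pyRange 0 k 1).foldl (mgpScanF target records) none = _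
    rw [PySem.List.pyRange_one]
    simp only [Int.sub_zero, hk, List.foldl_map, Int.zero_add]
  rcases haux with ⟨hst, hall⟩ | ⟨b, hb, hst, hopen, hmin⟩
  · exact Or.inl ⟨hrw.trans hst, fun j hj => hall j hj⟩
  · exact Or.inr ⟨b, hb, hrw.trans hst, hopen, fun j hj => hmin j hj⟩

theorem length_mgpToHeap (R : List MgpRec) : (mgpToHeap R).length = R.length := by
  simp [mgpToHeap]

theorem getElem_mgpToHeap (R : List MgpRec) (j : Nat) (h : j < (mgpToHeap R).length) :
    (mgpToHeap R)[j] = mgpTupAt R j := by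
  simp [mgpToHeap]

theorem mem_mgpToHeap {x : MgpTup} {R : List MgpRec} :
    x ∈ mgpToHeap R ↔ ∃ j, j < R.length ∧ x = mgpTupAt R j := by
  simp [mgpToHeap, List.mem_map, eq_comm]

theorem mgpTupAt_mem (R : List MgpRec) (p : Nat) (hp : p < R.length) :
    mgpTupAt R p ∈ mgpToHeap R := mem_mgpToHeap.mpr ⟨p, hp, rfl⟩

theorem mgpMin_unique (target : Option Int) (R : List MgpRec) (heap : List MgpTup)
    (hperm : heap.Perm (mgpToHeap R))
    (m : MgpTup) (hm : m ∈ heap) (hmo : mgpOpen target m)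
    (hmin : ∀ x ∈ heap, mgpOpen target x → ¬ mgpKeyLt (mgpKey x) (mgpKey m))
    (p : Nat) (hp : p < R.length) (hpo : mgpOpen target (mgpTupAt R p))
    (hminp : ∀ j, j < R.length → mgpOpen target (mgpTupAt R j) →
      ¬ mgpKeyLt (mgpKey (mgpTupAt R j)) (mgpKey (mgpTupAt R p))) :
    m = mgpTupAt R p := by
  obtain ⟨j, hj, rfl⟩ := mem_mgpToHeap.mp (hperm.mem_iff.mp hm)
  have h1 := hminp j hj hmo
  have h2 := hmin (mgpTupAt R p) (hperm.mem_iff.mpr (mgpTupAt_mem R p hp)) hpo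
  have hkeys := mgpKeyLt_antisymm h1 h2
  have hjp : (j : Int) = (p : Int) := congrArg (fun q => q.2.2) hkeys
  have : j = p := by exact_mod_cast hjp
  rw [this]

theorem set_perm_cons_eraseIdx {α : Type} (l : List α) (j : Nat) (h : j < l.length) (v : α) :
    (l.set j v).Perm (v :: l.eraseIdx j) := by
  rw [List.set_eq_take_cons_drop v h, List.eraseIdx_eq_take_drop_succ]
  exact List.perm_middle

theorem perm_cons_eraseIdx {α : Type} (l : List α) (j : Nat) (h : j < l.length) :
    l.Perm (l[j] :: l.eraseIdx j) := by
  conv_lhs => rw [← List.take_append_drop j l]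
  rw [List.drop_eq_getElem_cons h, List.eraseIdx_eq_take_drop_succ]
  exact List.perm_middle

theorem mgpToHeap_set (R : List MgpRec) (j : Nat) (h : j < R.length) (r' : MgpRec) :
    mgpToHeap (R.set j r') = (mgpToHeap R).set j (r'.1, r'.2.1, (j : Int), r'.2.2) := by
  apply List.ext_getElem
  · simp [mgpToHeap]
  · intro i hi1 hi2
    have hi : i < R.length := by simpa [mgpToHeap] using hi1
    rw [getElem_mgpToHeap _ _ (by simpa [mgpToHeap] using hi1)]
    rw [List.getElem_set]
    by_cases hij : j = i
    · subst hij
      rw [if_pos rfl]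
      simp [mgpTupAt, h]
    · rw [if_neg hij, getElem_mgpToHeap _ _ (by simpa [mgpToHeap] using hi)]
      simp [mgpTupAt, List.getElem?_set_ne hij]

theorem mgpToHeap_map_items (R : List MgpRec) :
    (mgpToHeap R).map (fun x => x.2.2.2) = R.map (fun r => r.2.2) := by
  apply List.ext_getElem
  · simp [mgpToHeap]
  · intro i hi1 hi2
    have hi : i < R.length := by simpa [mgpToHeap] using hi1
    simp [mgpToHeap, mgpTupAt, List.getElem?_eq_getElem hi]

theorem mgpStep_rel (seqlen : List Int) (target : Option Int) (k : Int) (hk : 0 < k)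
    (stA : Option (List MgpTup)) (stB : Option (List MgpRec)) (idx : Int)
    (h : MgpRel k stA stB) :
    MgpRel k (mgpStepA seqlen target stA idx) (mgpStepB seqlen target k stB idx) := by
  rcases h with ⟨hA, hB⟩ | ⟨heap, R, hA, hB, hlen, hperm⟩
  · subst hA; subst hB
    exact Or.inl ⟨rfl, rfl⟩
  · subst hA; subst hB
    have hlenheap : heap.length = R.length := hperm.length_eq.trans (length_mgpToHeap R)
    have hRpos : 0 < R.length := by rw [hlen]; omega
    rcases mgpScan_spec target k R hlen with ⟨hsc, hall⟩ | ⟨p, hp, hsc, hpo, hpmin⟩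
    · -- no open partition: both sides raise
      cases target with
      | none => exact absurd (hall 0 hRpos) (by simp [mgpOpen])
      | some t =>
        have hnone : ∀ x ∈ heap, ¬ x.2.1 < t := by
          intro x hx
          obtain ⟨j, hj, rfl⟩ := mem_mgpToHeap.mp (hperm.mem_iff.mp hx)
          have := hall j hj
          simpa [mgpOpen] using this
        have hplnone := mgpPopLoop_none t heap.length heap [] hnone
        rcases hres : mgpPopLoop t heap.length heap [] with ⟨tmp, res⟩
        rw [hres] at hplnone
        simp only at hplnone
        subst hplnone
        simp only [mgpStepA, mgpStepB, hsc, hres]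
        exact Or.inl ⟨rfl, rfl⟩
    · -- chosen partition p: both sides pick the same tuple
      have hmB : mgpTupAt R p ∈ heap := hperm.mem_iff.mpr (mgpTupAt_mem R p hp)
      have hminB : ∀ j, j < R.length → mgpOpen target (mgpTupAt R j) →
          ¬ mgpKeyLt (mgpKey (mgpTupAt R j)) (mgpKey (mgpTupAt R p)) := fun j hj => hpmin j hj
      have hptoHeap : p < (mgpToHeap R).length := by rw [length_mgpToHeap]; exact hp
      -- common data
      have hne : heap ≠ [] := by
        intro h0; rw [h0] at hlenheap; simp at hlenheap; omega
      rcases target with _ | t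
      · -- target = none: plain heappop
        obtain ⟨mA, hpm, hmA, hminA⟩ := mgpPopMin_spec heap hne
        have hmAeq : mA = mgpTupAt R p :=
          mgpMin_unique none R heap hperm mA hmA trivial
            (fun x hx _ => hminA x hx) p hp hpo hminB
        subst hmAeq
        simp only [mgpStepA, mgpStepB, hsc, hpm, PySem.List.pyGetD_natCast, Int.toNat_natCast]
        refine Or.inr ⟨_, _, rfl, rfl, by simp [hlen], ?_⟩
        have e1 := mgpToHeap_set R p hp
          ((R.getD p (0,0,[])).1 + PySem.List.pyGetD seqlen idx 0, (R.getD p (0,0,[])).2.1 + 1,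
            (R.getD p (0,0,[])).2.2 ++ [idx])
        rw [e1]
        have h2 := (set_perm_cons_eraseIdx (mgpToHeap R) p hptoHeap
          (((R.getD p (0,0,[])).1 + PySem.List.pyGetD seqlen idx 0, (R.getD p (0,0,[])).2.1 + 1,
            (p : Int), (R.getD p (0,0,[])).2.2 ++ [idx]) : MgpTup)).symm
        have h3 : (mgpToHeap R).Perm (mgpTupAt R p :: (mgpToHeap R).eraseIdx p) := by
          have := perm_cons_eraseIdx (mgpToHeap R) p hptoHeap
          rwa [getElem_mgpToHeap] at this
        have h4 := List.perm_cons_erase (mgpTupAt_mem R p hp)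
        have h5 : ((mgpToHeap R).erase (mgpTupAt R p)).Perm ((mgpToHeap R).eraseIdx p) :=
          (h4.symm.trans h3).cons_inv
        have h6 : (heap.erase (mgpTupAt R p)).Perm ((mgpToHeap R).erase (mgpTupAt R p)) :=
          hperm.erase _
        have h7 : (heap.erase (mgpTupAt R p) ++
            [(((mgpTupAt R p).1 + PySem.List.pyGetD seqlen idx 0, (mgpTupAt R p).2.1 + 1,
              (mgpTupAt R p).2.2.1, (mgpTupAt R p).2.2.2 ++ [idx]) : MgpTup)]).Perm
            ((((mgpTupAt R p).1 + PySem.List.pyGetD seqlen idx 0, (mgpTupAt R p).2.1 + 1,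
              (mgpTupAt R p).2.2.1, (mgpTupAt R p).2.2.2 ++ [idx]) : MgpTup) ::
              heap.erase (mgpTupAt R p)) := List.perm_append_singleton _ _
        refine h7.trans (((h6.trans h5).cons _).trans ?_)
        exact h2
      · -- target = some t: pop-and-stash loop
        have hopen_t : (mgpTupAt R p).2.1 < t := by simpa [mgpOpen] using hpo
        obtain ⟨mA, rest, d, heq, hmA, hmAt, hminA, hpermd⟩ :=
          mgpPopLoop_some t heap.length heap [] (le_refl _) ⟨mgpTupAt R p, hmB, hopen_t⟩
        have hmAeq : mA = mgpTupAt R p := by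
          refine mgpMin_unique (some t) R heap hperm mA hmA hmAt
            (fun x hx hxo => hminA x hx (by simpa [mgpOpen] using hxo)) p hp hpo hminB
        subst hmAeq
        rw [List.nil_append] at heq
        simp only [mgpStepA, mgpStepB, hsc, heq, PySem.List.pyGetD_natCast, Int.toNat_natCast]
        refine Or.inr ⟨_, _, rfl, rfl, by simp [hlen], ?_⟩
        have e1 := mgpToHeap_set R p hp
          ((R.getD p (0,0,[])).1 + PySem.List.pyGetD seqlen idx 0, (R.getD p (0,0,[])).2.1 + 1,
            (R.getD p (0,0,[])).2.2 ++ [idx])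
        rw [e1]
        have h2 := (set_perm_cons_eraseIdx (mgpToHeap R) p hptoHeap
          (((R.getD p (0,0,[])).1 + PySem.List.pyGetD seqlen idx 0, (R.getD p (0,0,[])).2.1 + 1,
            (p : Int), (R.getD p (0,0,[])).2.2 ++ [idx]) : MgpTup)).symm
        have h3 : (mgpToHeap R).Perm (mgpTupAt R p :: (mgpToHeap R).eraseIdx p) := by
          have := perm_cons_eraseIdx (mgpToHeap R) p hptoHeap
          rwa [getElem_mgpToHeap] at this
        have h4 := List.perm_cons_erase (mgpTupAt_mem R p hp)
        have h5 : ((mgpToHeap R).erase (mgpTupAt R p)).Perm ((mgpToHeap R).eraseIdx p) :=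
          (h4.symm.trans h3).cons_inv
        have h6 : (heap.erase (mgpTupAt R p)).Perm ((mgpToHeap R).erase (mgpTupAt R p)) :=
          hperm.erase _
        -- rest ++ [m'] ++ d  ~  m' :: (d ++ rest)
        have h8 : ((rest ++
            [(((mgpTupAt R p).1 + PySem.List.pyGetD seqlen idx 0, (mgpTupAt R p).2.1 + 1,
              (mgpTupAt R p).2.2.1, (mgpTupAt R p).2.2.2 ++ [idx]) : MgpTup)]) ++ d).Perm
            ((((mgpTupAt R p).1 + PySem.List.pyGetD seqlen idx 0, (mgpTupAt R p).2.1 + 1,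
              (mgpTupAt R p).2.2.1, (mgpTupAt R p).2.2.2 ++ [idx]) : MgpTup) :: (d ++ rest)) := by
          refine ((List.perm_append_singleton _ rest).append_right d).trans ?_
          exact (List.perm_append_comm (l₁ := rest) (l₂ := d)).cons _
        refine h8.trans (((hpermd.trans (h6.trans h5)).cons _).trans ?_)
        exact h2
  

theorem mgpFold_rel (seqlen : List Int) (target : Option Int) (k : Int) (hk : 0 < k)
    (L : List Int) (stA : Option (List MgpTup)) (stB : Option (List MgpRec))
    (h : MgpRel k stA stB) :
    MgpRel k (L.foldl (mgpStepA seqlen target) stA) (L.foldl (mgpStepB seqlen target k) stB) := by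
  induction L generalizing stA stB with
  | nil => exact h
  | cons x xs ih => exact ih _ _ (mgpStep_rel seqlen target k hk stA stB x h)

theorem mgpInit_eq (k : Int) :
    (PySem.List.pyRange 0 k 1).map (fun p => (((0 : Int), (0 : Int), p, ([] : List Int)) : MgpTup)) =
      mgpToHeap ((PySem.List.pyRange 0 k 1).map (fun _ => (((0 : Int), (0 : Int), ([] : List Int)) : MgpRec))) := by
  apply List.ext_getElem
  · simp [mgpToHeap]
  · intro i hi1 hi2
    have hi : i < (PySem.List.pyRange 0 k 1).length := by simpa using hi1
    rw [getElem_mgpToHeap _ _ (by simpa [mgpToHeap] using hi2)]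
    have hi' : i < (k - 0).toNat := by simpa [PySem.List.length_pyRange_one] using hi
    simp [mgpTupAt, PySem.List.getElem_pyRange_one]

theorem mgpToHeap_pairwise (R : List MgpRec) :
    (mgpToHeap R).Pairwise (fun a b => a.2.2.1 < b.2.2.1) := by
  rw [mgpToHeap, List.pairwise_map]
  exact List.pairwise_lt_range.imp (fun h => by simp [mgpTupAt]; exact_mod_cast h)

-- ===== VERDICT (by name: the statement is the Claim_ definition above) =====
theorem multiway_greedy_partition_spec : Claim_equal_multiway_greedy_partition := by
  intro seqlen_list k_partitions equal_size _ hpre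
  obtain ⟨hk, hkn, hmod⟩ := hpre
  unfold Spec_multiway_greedy_partition multiway_greedy_partition multiway_greedy_partition_alt
  have h3 : ¬ (equal_size = true ∧ ¬ PySem.Int.mod (seqlen_list.length : Int) k_partitions = 0) := by
    rintro ⟨he, hm⟩; exact hm (hmod he)
  simp only []
  rw [if_pos hk, if_pos hkn, if_neg h3, if_pos hk, if_pos hkn, if_neg h3]
  have hrel0 : MgpRel k_partitions
      (some ((PySem.List.pyRange 0 k_partitions 1).map (fun p => (((0:Int), (0:Int), p, ([] : List Int)) : MgpTup))))
      (some ((PySem.List.pyRange 0 k_partitions 1).map (fun _ => (((0:Int), (0:Int), ([] : List Int)) : MgpRec)))) := by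
    refine Or.inr ⟨_, _, rfl, rfl, ?_, ?_⟩
    · simp [PySem.List.length_pyRange_one]
    · rw [mgpInit_eq]
  have hrel := mgpFold_rel seqlen_list
    (if equal_size = true then some (PySem.Int.floordiv (seqlen_list.length : Int) k_partitions) else none)
    k_partitions hk
    (PySem.List.sorted (PySem.List.pyRange 0 (seqlen_list.length : Int) 1)
      (fun i => PySem.List.pyGetD seqlen_list i 0) true)
    _ _ hrel0
  rcases hrel with ⟨hA, hB⟩ | ⟨heap, R, hA, hB, hlenR, hperm⟩
  · rw [hA, hB]
  · rw [hA, hB]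
    have hsorted : PySem.List.sorted heap (fun x => x.2.2.1) false = mgpToHeap R :=
      PySem.List.sorted_eq_of_perm_of_pairwise_lt heap (mgpToHeap R) _ hperm.symm (mgpToHeap_pairwise R)
    simp only [hsorted, mgpToHeap_map_items]
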